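-- pv_equiv track=rewrite | github.com/eshun4/FundamentalCodingInterviewPrep | 07/longest_common_suffix.py | solution
-- ===== SOURCE A (Python) =====
-- def solution(strs):
--     # TODO: Implement the function
--     # If array is empty return empty string
--     if not strs:
--         return ""
--
--     # Since we are looking for suffix and not prefix we have to fist reverse the strings in strs
--     strs = [st[::-1] for st in strs]
--
--     # next find the shortest string among the reversed string
--     shortest = min(strs, key=len)
--
--     # loop through each character in the newly reversed strs array and if there is a mismatch in the
--     # characters return the shortest path from index 0 to the index where there is a mismatch(non-inclusive)
--     for i, char in enumerate(shortest):
--         for other in strs: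
--             if other[i] != char:
--                 # Return it reversed
--                 return shortest[:i][::-1]
--
--     return shortest[::-1]
-- ===== SOURCE B (Python) =====
-- def solution(strs):
--     # Horizontal scan: keep a candidate suffix and shrink it from the front
--     # until every string ends with it.  ''.endswith(...) logic makes this total.
--     if not strs:
--         return ""
--     cand = strs[0]
--     for s in strs[1:]:
--         while not s.endswith(cand):
--             cand = cand[1:]
--     return cand
-- ===== Notes on version B (the rewrite author's own statement) =====
-- stated objective: idiomatic
-- what changed: Replaced A's reverse-everything + min-by-length + vertical index-by-index scan with a horizontal scan that keeps a candidate suffix (initially strs[0]) and trims its front with endswith per string, with no reversals at all.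
import Mathlib
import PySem

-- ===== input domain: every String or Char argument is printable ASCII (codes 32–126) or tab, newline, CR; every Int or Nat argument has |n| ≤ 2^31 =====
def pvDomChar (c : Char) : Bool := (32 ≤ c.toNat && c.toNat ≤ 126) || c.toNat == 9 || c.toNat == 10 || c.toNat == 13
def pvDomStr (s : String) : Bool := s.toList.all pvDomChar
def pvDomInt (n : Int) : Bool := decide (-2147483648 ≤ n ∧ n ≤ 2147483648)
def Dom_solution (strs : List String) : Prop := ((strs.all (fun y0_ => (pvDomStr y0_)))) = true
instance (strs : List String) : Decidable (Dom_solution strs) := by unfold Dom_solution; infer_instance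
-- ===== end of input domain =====

-- B replaces A's reverse-all + min-by-length + vertical per-index scan by a horizontal
-- endswith-trimming scan over a candidate suffix (idiomatic; no reversals). Proved equal on all inputs.

-- ===== PORT A =====
-- inner 'for other in strs: if other[i] != char: return …' as a Bool-valued scan
-- (other[i] via PySem.List.pyGet?; in A this index is always in range, see solution_spec).
def aInner (R : List (List Char)) (i : Int) (c : Char) : Bool :=
  match R with
  | [] => false
  | o :: rest => if PySem.List.pyGet? o i ≠ some c then true else aInner rest i c

-- outer 'for i, char in enumerate(shortest)'; shortest[:i][::-1] = (slice … ).reverse.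
def aOuter (R : List (List Char)) (shortest : List Char) : List (Int × Char) → List Char
  | [] => shortest.reverse
  | (i, c) :: rest =>
      if aInner R i c then (PySem.List.slice shortest none (some i)).reverse
      else aOuter R shortest rest

def solution (strs : List String) : String :=
  if strs = [] then "" else
    -- strs = [st[::-1] for st in strs]  (s[::-1] = reverse, PySem.Str.slice?_none_none_neg_one)
    let R : List (List Char) := strs.map (fun st => st.toList.reverse)
    -- shortest = min(strs, key=len)
    match PySem.List.min? R (fun l => l.length) with
    | none => ""   -- unreachable: R is nonempty
    | some shortest => String.ofList (aOuter R shortest (PySem.List.enumerate shortest 0))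

-- ===== PORT B =====
-- 'while not s.endswith(cand): cand = cand[1:]'  (cand[1:] = tail, PySem.List.slice_from_one)
def trimCand (s : List Char) (cand : List Char) : List Char :=
  if PySem.Chars.endswith s cand then cand else trimCand s cand.tail
termination_by cand.length
decreasing_by
  have hne : cand ≠ [] := by
    intro h
    subst h
    simp [PySem.Chars.endswith_iff] at *
  cases cand with
  | nil => exact absurd rfl hne
  | cons c cs => simp

def solution_alt (strs : List String) : String :=
  match strs with
  | [] => ""
  | s0 :: rest =>
      String.ofList (rest.foldl (fun cand s => trimCand s.toList cand) s0.toList)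

-- ===== PRECONDITION & SPEC =====
def Spec_solution (strs : List String) (out : String) : Prop := out = solution_alt strs
instance (strs : List String) (out : String) : Decidable (Spec_solution strs out) := by unfold Spec_solution; infer_instance

-- ===== CLAIM (what is proved, stated in full; the proofs are below) =====
def Claim_equal_solution : Prop := ∀ (strs : List String), Dom_solution strs → Spec_solution strs (solution strs)

-- ===== LEMMAS AND PROOFS =====

-- r is THE longest common suffix of the char lists ls
def IsLCS (ls : List (List Char)) (r : List Char) : Prop :=
  (∀ l ∈ ls, r <:+ l) ∧ ∀ t, (∀ l ∈ ls, t <:+ l) → t.length ≤ r.length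

theorem IsLCS_unique {ls : List (List Char)} (hne : ls ≠ []) {r₁ r₂ : List Char}
    (h₁ : IsLCS ls r₁) (h₂ : IsLCS ls r₂) : r₁ = r₂ := by
  obtain ⟨l0, hl0⟩ := List.exists_mem_of_ne_nil ls hne
  have hle : r₁.length ≤ r₂.length := h₂.2 r₁ h₁.1
  have hge : r₂.length ≤ r₁.length := h₁.2 r₂ h₂.1
  exact List.IsSuffix.eq_of_length
    (List.suffix_of_suffix_length_le (h₁.1 l0 hl0) (h₂.1 l0 hl0) hle) (le_antisymm hle hge)

theorem trim_spec (s cand : List Char) :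
    (trimCand s cand <:+ cand) ∧ (trimCand s cand <:+ s) ∧
    ∀ t, t <:+ cand → t <:+ s → t.length ≤ (trimCand s cand).length := by
  induction cand using trimCand.induct s with
  | case1 cand hend =>
      rw [trimCand, if_pos hend]
      exact ⟨List.suffix_rfl, (PySem.Chars.endswith_iff s cand).mp hend,
        fun t ht _ => ht.length_le⟩
  | case2 cand hend ih =>
      rw [trimCand, if_neg hend]
      have hne : cand ≠ [] := by
        intro h; subst h; simp [PySem.Chars.endswith_iff] at hend
      obtain ⟨c, cs, rfl⟩ := List.exists_cons_of_ne_nil hne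
      refine ⟨ih.1.trans (List.suffix_cons c cs), ih.2.1, ?_⟩
      intro t ht hts
      have htne : t ≠ c :: cs := by
        intro h; subst h
        exact hend ((PySem.Chars.endswith_iff s _).mpr hts)
      have : t <:+ cs := by
        obtain ⟨p, hp⟩ := ht
        cases p with
        | nil => exact absurd (by simpa using hp) htne
        | cons a as =>
            exact ⟨as, ((by simpa using hp : a = c ∧ as ++ t = cs)).2⟩
      exact ih.2.2 t this hts

theorem foldB_spec (rest : List String) (ls : List (List Char)) (cand : List Char)
    (hne : ls ≠ []) (h : IsLCS ls cand) :
    IsLCS (ls ++ rest.map (fun s => s.toList))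
      (rest.foldl (fun cand s => trimCand s.toList cand) cand) := by
  induction rest generalizing ls cand with
  | nil => simpa using h
  | cons s rest' ih =>
      obtain ⟨l0, hl0⟩ := List.exists_mem_of_ne_nil ls hne
      have hts := trim_spec s.toList cand
      have h' : IsLCS (ls ++ [s.toList]) (trimCand s.toList cand) := by
        constructor
        · intro l hl
          rcases List.mem_append.mp hl with hl | hl
          · exact hts.1.trans (h.1 l hl)
          · simp at hl; subst hl; exact hts.2.1
        · intro t htall
          have htc : t <:+ cand :=
            List.suffix_of_suffix_length_le (htall l0 (List.mem_append_left _ hl0))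
              (h.1 l0 hl0) (h.2 t (fun l hl => htall l (List.mem_append_left _ hl)))
          exact hts.2.2 t htc (htall s.toList (by simp))
      have := ih (ls ++ [s.toList]) (trimCand s.toList cand) (by simp) h'
      simpa [List.append_assoc] using this

theorem alt_isLCS (s0 : String) (rest : List String) :
    IsLCS ((s0 :: rest).map (fun s => s.toList)) (solution_alt (s0 :: rest)).toList := by
  have h0 : IsLCS [s0.toList] s0.toList :=
    ⟨by intro l hl; simp at hl; subst hl; exact List.suffix_rfl,
     fun t ht => (ht s0.toList (by simp)).length_le⟩
  have := foldB_spec rest [s0.toList] s0.toList (by simp) h0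
  simpa [solution_alt] using this

-- r is THE longest common prefix of the char lists
def IsLCP (R : List (List Char)) (r : List Char) : Prop :=
  (∀ o ∈ R, r <+: o) ∧ ∀ t, (∀ o ∈ R, t <+: o) → t.length ≤ r.length

theorem aInner_true_iff (R : List (List Char)) (i : Int) (c : Char) :
    aInner R i c = true ↔ ∃ o ∈ R, PySem.List.pyGet? o i ≠ some c := by
  induction R with
  | nil => simp [aInner]
  | cons o rest ih =>
      by_cases h : PySem.List.pyGet? o i = some c <;> simp [aInner, h, ih]

theorem prefix_take_succ {o t : List Char} {k : Nat} {c : Char}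
    (h : t.take k <+: o) (hk : k ≤ t.length) (ho : o[k]? = some c) :
    t.take k ++ [c] <+: o := by
  have hlen : (t.take k).length = k := by simp [hk]
  have htk : o.take k = t.take k := by
    have := List.prefix_iff_eq_take.mp h
    rw [this, hlen]
  have hko : k < o.length := (List.getElem?_eq_some_iff.mp ho).1
  have : o = t.take k ++ c :: o.drop (k+1) := by
    conv_lhs => rw [← List.take_append_drop k o, htk,
      List.drop_eq_getElem_cons hko]
    have : o[k] = c := by
      have := (List.getElem?_eq_some_iff.mp ho).2; simpa using this
    rw [this]
  refine ⟨o.drop (k+1), ?_⟩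
  conv_rhs => rw [this]
  simp

theorem aOuter_inv (R : List (List Char)) (shortest : List Char)
    (hsh : shortest ∈ R) :
    ∀ todo (k : Nat), shortest.drop k = todo → (∀ o ∈ R, shortest.take k <+: o) →
    IsLCP R (aOuter R shortest (PySem.List.enumerate todo (k : Int))).reverse := by
  intro todo
  induction todo generalizing R with
  | nil =>
      intro k hdrop hmatch
      have hk : shortest.length ≤ k := by
        by_contra hlt
        push Not at hlt
        have := congrArg List.length hdrop
        simp at this
        omega
      have hts : shortest.take k = shortest := List.take_of_length_le hk
      simp only [PySem.List.enumerate_nil, aOuter, List.reverse_reverse]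
      refine ⟨fun o ho => hts ▸ hmatch o ho, fun t ht => (ht shortest hsh).length_le⟩
  | cons c todo' ih =>
      intro k hdrop hmatch
      have hk : k < shortest.length := by
        by_contra hge
        push Not at hge
        rw [List.drop_eq_nil_of_le hge] at hdrop
        simp at hdrop
      have hck : shortest[k] = c := by
        rw [List.drop_eq_getElem_cons hk] at hdrop
        exact (List.cons.inj hdrop).1
      have hdrop' : shortest.drop (k+1) = todo' := by
        rw [List.drop_eq_getElem_cons hk] at hdrop
        exact (List.cons.inj hdrop).2
      rw [PySem.List.enumerate_cons]
      by_cases hmis : aInner R (k : Int) c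
      · simp only [aOuter, hmis, if_pos, PySem.List.slice_to_natCast,
          List.reverse_reverse]
        refine ⟨hmatch, ?_⟩
        intro t ht
        by_contra hlong
        push Not at hlong
        have hlt : (shortest.take k).length = k := by simp [Nat.le_of_lt hk]
        rw [hlt] at hlong
        obtain ⟨o, ho, hne⟩ := (aInner_true_iff R k c).mp hmis
        have hkt : k < t.length := hlong
        -- t[k] = shortest[k] = c  (t is a prefix of shortest ∈ R)
        have hts : t <+: shortest := ht shortest hsh
        have h1 : t[k]? = some c := by
          have := List.prefix_iff_eq_take.mp hts
          rw [this, List.getElem?_take, if_pos hkt]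
          simp [List.getElem?_eq_getElem (by omega : k < shortest.length), hck]
        have h2 : o[k]? = some c := by
          have hto : t <+: o := ht o ho
          have := List.prefix_iff_eq_take.mp hto
          rw [this, List.getElem?_take, if_pos hkt] at h1
          exact h1
        exact hne (by simpa using h2)
      · simp only [aOuter, hmis, if_neg, Bool.false_eq_true, not_false_iff]
        have hall : ∀ o ∈ R, PySem.List.pyGet? o (k : Int) = some c := by
          intro o ho
          by_contra hne
          exact hmis ((aInner_true_iff R k c).mpr ⟨o, ho, hne⟩)
        have hmatch' : ∀ o ∈ R, shortest.take (k+1) <+: o := by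
          intro o ho
          have hok : o[k]? = some c := by simpa using hall o ho
          have := prefix_take_succ (hmatch o ho) (Nat.le_of_lt hk) hok
          rw [← List.take_append_getElem hk, hck]
          exact this
        have := ih R hsh (k+1) hdrop' hmatch'
        have hcast : ((k : Int) + 1) = ((k+1 : Nat) : Int) := by push_cast; ring
        rwa [hcast]

theorem lcp_to_lcs (ls : List (List Char)) (r : List Char)
    (h : IsLCP (ls.map List.reverse) r) : IsLCS ls r.reverse := by
  constructor
  · intro l hl
    have := h.1 l.reverse (List.mem_map_of_mem hl)
    have h2 : r.reverse <:+ l.reverse.reverse := List.reverse_suffix.mpr this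
    simpa using h2
  · intro t ht
    have : t.reverse.length ≤ r.length := by
      apply h.2
      intro o ho
      obtain ⟨l, hl, rfl⟩ := List.mem_map.mp ho
      exact List.reverse_prefix.mpr (ht l hl)
    simpa using this

theorem a_isLCS (s0 : String) (rest : List String) :
    IsLCS ((s0 :: rest).map (fun s => s.toList)) (solution (s0 :: rest)).toList := by
  have hRe : ((s0 :: rest).map (fun st => st.toList.reverse))
      = ((s0 :: rest).map (fun s => s.toList)).map List.reverse := by
    simp [List.map_map]
  have hRne : (s0 :: rest).map (fun st => st.toList.reverse) ≠ [] := by simp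
  generalize hR : (s0 :: rest).map (fun st => st.toList.reverse) = R at hRe hRne
  obtain ⟨shortest, hmin⟩ :
      ∃ m, PySem.List.min? R (fun l => l.length) = some m := by
    cases hm : PySem.List.min? R (fun l => l.length) with
    | none => exact absurd ((PySem.List.min?_eq_none_iff R _).mp hm) hRne
    | some m => exact ⟨m, rfl⟩
  have hsol : solution (s0 :: rest)
      = String.ofList (aOuter R shortest (PySem.List.enumerate shortest 0)) := by
    show (if (s0 :: rest) = [] then "" else
      match PySem.List.min? ((s0 :: rest).map (fun st => st.toList.reverse))
          (fun l => l.length) with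
      | none => ""
      | some shortest =>
          String.ofList (aOuter ((s0 :: rest).map (fun st => st.toList.reverse))
            shortest (PySem.List.enumerate shortest 0)))
      = String.ofList (aOuter R shortest (PySem.List.enumerate shortest 0))
    rw [if_neg (by simp : ¬(s0 :: rest = [])), hR, hmin]
  have hsh : shortest ∈ R := PySem.List.min?_mem hmin
  have hinv := aOuter_inv R shortest hsh shortest 0 (by simp) (by simp)
  rw [hRe] at hinv
  have := lcp_to_lcs _ _ hinv
  rw [hsol]
  simpa [← hR, Function.comp] using this

-- ===== VERDICT (by name: the statement is the Claim_ definition above) =====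
theorem solution_spec : Claim_equal_solution := by
  intro strs _
  unfold Spec_solution
  cases strs with
  | nil => rfl
  | cons s0 rest =>
      have h := IsLCS_unique (ls := (s0 :: rest).map (fun s => s.toList)) (by simp)
        (a_isLCS s0 rest) (alt_isLCS s0 rest)
      exact String.toList_inj.mp h
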